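-- pv_equiv track=rewrite | github.com/loh-0/Lohith-Coding-Projects | connectk.py | vertical_check_k
-- ===== SOURCE A (Python) =====
-- def vertical_check_k(board,player,k):
-- 	'''
-- 	Inputs: (board, player, k)
-- 	returns a count for how many vertical ks there are on the board
--
-- 	'''
-- 	consectokens = 0
-- 	count = 0
--
-- 	#iterating through the board
-- 	for row in range(len(board) - (k - 1)):
-- 		for column in range(len(board[0])):
-- 			#checking consecutive pieces for the player
-- 			if board[row][column] == player:
-- 				consectokens = 0
-- 				for kadd in range(k):
-- 					if board[row][column] == board[row + kadd][column]:
-- 						consectokens += 1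
--
-- 						if consectokens == k:
-- 							count+=1
--
-- 	return count
-- ===== SOURCE B (Python) =====
-- def vertical_check_k(board, player, k):
--     total = 0
--     cols = len(board[0]) if board else 0
--     for c in range(cols):
--         run = 0
--         for row in board:
--             if row[c] == player:
--                 run += 1
--                 if run >= k:
--                     total += 1
--             else:
--                 run = 0
--     return total
-- ===== Notes on version B (the rewrite author's own statement) =====
-- stated objective: alternative
-- what changed: Replaces A's row-major per-cell re-scan of each k-window by a single column-major pass that keeps a running consecutive-run counter and counts every position whose run reaches k.
-- outside the precondition, e.g. on vertical_check_k([['a', 'b'], ['p']], 'p', 2): A returns 0, B raises IndexError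
import Mathlib
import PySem

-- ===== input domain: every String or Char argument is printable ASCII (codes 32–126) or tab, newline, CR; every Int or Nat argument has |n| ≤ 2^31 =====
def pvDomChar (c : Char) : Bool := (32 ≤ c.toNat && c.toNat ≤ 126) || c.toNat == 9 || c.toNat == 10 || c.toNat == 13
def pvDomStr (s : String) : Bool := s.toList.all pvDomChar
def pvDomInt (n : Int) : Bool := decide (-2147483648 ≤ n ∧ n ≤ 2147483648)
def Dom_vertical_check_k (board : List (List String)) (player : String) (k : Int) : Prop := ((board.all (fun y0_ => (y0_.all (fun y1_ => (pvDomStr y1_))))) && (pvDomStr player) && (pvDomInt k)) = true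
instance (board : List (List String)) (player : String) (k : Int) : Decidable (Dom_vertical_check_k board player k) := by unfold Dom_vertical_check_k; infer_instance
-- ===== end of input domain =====

-- B replaces A's per-cell re-scan of each k-window by a single column-major pass with a
-- running consecutive-run counter (counts every cell whose run reaches k).

-- ===== PORT A =====
def vertical_check_k (board : List (List String)) (player : String) (k : Int) : Int :=
  ((PySem.List.pyRange 0 ((board.length : Int) - (k - 1)) 1).foldl (fun st row =>
    (PySem.List.pyRange 0 ((PySem.List.pyGetD board 0 []).length : Int) 1).foldl (fun st column =>
      if PySem.List.pyGetD (PySem.List.pyGetD board row []) column "" == player then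
        (PySem.List.pyRange 0 k 1).foldl (fun st kadd =>
          if PySem.List.pyGetD (PySem.List.pyGetD board row []) column ""
             == PySem.List.pyGetD (PySem.List.pyGetD board (row + kadd) []) column "" then
            ((st.1 + 1 : Int), if st.1 + 1 == k then st.2 + 1 else st.2)
          else st) ((0 : Int), st.2)
      else st) st) ((0 : Int), (0 : Int))).2

-- ===== PORT B =====
def vertical_check_k_alt (board : List (List String)) (player : String) (k : Int) : Int :=
  let cols : Int := if board.isEmpty then 0 else ((PySem.List.pyGetD board 0 []).length : Int)
  (PySem.List.pyRange 0 cols 1).foldl (fun total c =>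
    (board.foldl (fun st row =>
      if PySem.List.pyGetD row c "" == player then
        ((st.1 + 1 : Int), if k ≤ st.1 + 1 then st.2 + 1 else st.2)
      else ((0 : Int), st.2)) ((0 : Int), total)).2) 0

-- ===== PRECONDITION & SPEC =====
-- Pre_ excludes k < 1 (where A raises IndexError unless row 0 is absent or empty) and ragged
-- boards whose rows are shorter than row 0, on which A raises IndexError except when the short
-- cells hide behind non-player cells (then A returns 0 but B raises IndexError).
def Pre_vertical_check_k (board : List (List String)) (player : String) (k : Int) : Prop :=
  (∀ r ∈ board, (board.headD []).length ≤ r.length) ∧ (1 ≤ k ∨ (1 ≤ board.length ∧ (board.headD []) = []))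
instance (board : List (List String)) (player : String) (k : Int) : Decidable (Pre_vertical_check_k board player k) := by unfold Pre_vertical_check_k; infer_instance

def pvWitness_vertical_check_k : List (List String) × String × Int := ([["x", "o"], ["x", "x"], ["x", "o"]], "x", 2)

def Spec_vertical_check_k (board : List (List String)) (player : String) (k : Int) (out : Int) : Prop := out = vertical_check_k_alt board player k
instance (board : List (List String)) (player : String) (k : Int) (out : Int) : Decidable (Spec_vertical_check_k board player k out) := by unfold Spec_vertical_check_k; infer_instance

-- ===== CLAIM (what is proved, stated in full; the proofs are below) =====
def Claim_equal_vertical_check_k : Prop := ∀ (board : List (List String)) (player : String) (k : Int), Dom_vertical_check_k board player k → Pre_vertical_check_k board player k → Spec_vertical_check_k board player k (vertical_check_k board player k)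

-- ===== LEMMAS AND PROOFS =====

-- the cell (i, c) of the board, read through Python's defaults, compared with player
def pvCellB (board : List (List String)) (player : String) (i c : Nat) : Bool :=
  (board.getD i []).getD c "" == player

-- "a window of k player-cells starts at row r of column c"
def pvWin (board : List (List String)) (player : String) (kn r c : Nat) : Bool :=
  (List.range kn).all (fun j => pvCellB board player (r + j) c)

-- "a run of at least k player-cells ends at row i of column c"
def pvEnd (board : List (List String)) (player : String) (kn c i : Nat) : Bool :=
  decide (kn ≤ i + 1) && (List.range kn).all (fun j => decide (i < j) || pvCellB board player (i - j) c)

-- snd of a fold whose step adds g x to the second component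
theorem pv_foldl_snd {α : Type} (f : Int × Int → α → Int × Int) (g : α → Int)
    (h : ∀ st x, (f st x).2 = st.2 + g x) :
    ∀ (l : List α) (st : Int × Int), (l.foldl f st).2 = st.2 + (l.map g).sum := by
  intro l
  induction l with
  | nil => simp
  | cons x t ih => intro st; rw [List.foldl_cons, ih, h st x]; simp; ring

-- A's innermost loop: running match counter over a list no longer than k
theorem pv_foldk (k : Int) (p : Int → Bool) (l : List Int) : ∀ (c t : Int), c + l.length ≤ k →
    (l.foldl (fun st j => if p j then ((st.1 + 1 : Int), if st.1 + 1 == k then st.2 + 1 else st.2) else st) (c, t))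
    = (c + (l.countP p : Int), if c + l.length = k ∧ l.all p = true ∧ l ≠ [] then t + 1 else t) := by
  induction l with
  | nil => intro c t h; simp
  | cons x rest ih =>
    intro c t h
    simp only [List.length_cons] at h
    push_cast at h
    by_cases hp : p x = true
    · simp only [List.foldl_cons, hp, if_true]
      rw [ih (c + 1) (if ((c + 1 : Int) == k) = true then t + 1 else t) (by omega)]
      rw [Prod.mk.injEq]
      constructor
      · simp [hp]; ring
      · rcases eq_or_ne (c + 1 : Int) k with he | he
        · have hr : rest = [] := by
            cases rest with
            | nil => rfl
            | cons a b => exfalso; simp at h; omega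
          subst hr
          simp [hp, he]
        · have ht' : (if ((c + 1 : Int) == k) = true then t + 1 else t) = t := by
            simp [beq_iff_eq, he]
          rw [ht']
          have hiff : (c + 1 + (rest.length : Int) = k ∧ rest.all p = true ∧ rest ≠ []) ↔
              (c + ((rest.length : Int) + 1) = k ∧ (x :: rest).all p = true ∧ x :: rest ≠ []) := by
            constructor
            · rintro ⟨h1, h2, h3⟩
              exact ⟨by omega, by simp [hp, h2], by simp⟩
            · rintro ⟨h1, h2, h3⟩
              refine ⟨by omega, by simpa [hp] using h2, ?_⟩
              cases rest with
              | nil => exfalso; apply he; simpa using h1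
              | cons a b => simp
          rw [if_congr hiff rfl rfl]
          simp only [List.length_cons]
          push_cast
          rfl
    · have hp' : p x = false := by simpa using hp
      simp only [List.foldl_cons, hp', if_false, Bool.false_eq_true]
      rw [ih c t (by omega)]
      rw [Prod.mk.injEq]
      constructor
      · simp [hp']
      · have h1 : ¬ (c + (rest.length : Int) = k ∧ rest.all p = true ∧ rest ≠ []) := by
          rintro ⟨ha, -, hne⟩
          have : (1 : Int) ≤ rest.length := by
            cases rest with
            | nil => exact absurd rfl hne
            | cons a b => simp
          omega
        have h2' : ¬ (c + ((x :: rest).length : Int) = k ∧ (x :: rest).all p = true ∧ x :: rest ≠ []) := by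
          rintro ⟨-, hall, -⟩
          simp [hp'] at hall
        rw [if_neg h1, if_neg h2']

-- A's innermost loop specialised to range(k), k ≥ 1
theorem pv_foldk_spec (k : Int) (hk : 1 ≤ k) (p : Int → Bool) (t : Int) :
    ((PySem.List.pyRange 0 k 1).foldl (fun st j => if p j then ((st.1 + 1 : Int), if st.1 + 1 == k then st.2 + 1 else st.2) else st) ((0 : Int), t)).2
    = t + (if (PySem.List.pyRange 0 k 1).all p then (1 : Int) else 0) := by
  have hne : PySem.List.pyRange 0 k 1 ≠ [] := by
    intro hnil
    have := congrArg List.length hnil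
    simp only [PySem.List.length_pyRange_one, List.length_nil] at this
    omega
  rw [pv_foldk k p _ 0 t (by simp only [PySem.List.length_pyRange_one]; omega)]
  by_cases ha : (PySem.List.pyRange 0 k 1).all p = true
  · rw [if_pos ⟨by simp only [PySem.List.length_pyRange_one]; omega, ha, hne⟩]
    simp [ha]
  · rw [if_neg (by rintro ⟨-, h2, -⟩; exact ha h2)]
    simp [ha]

-- B's per-column loop: running run-length counter, counted by run ends
theorem pv_runB (k : Int) (kn : Nat) (hkn : (kn : Int) = k) (hk1 : 1 ≤ kn) (fl : List Bool) :
    ∀ (cr : Nat) (t : Int),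
    (fl.foldl (fun st b => if b then ((st.1 + 1 : Int), if k ≤ st.1 + 1 then st.2 + 1 else st.2) else ((0 : Int), st.2)) (((cr : Nat) : Int), t)).2
    = t + ((List.range fl.length).countP (fun i => decide (kn ≤ cr + i + 1) && (List.range kn).all (fun j => decide (i < j) || fl.getD (i - j) false)) : Int) := by
  induction fl with
  | nil => intro cr t; simp
  | cons b rest ih =>
    intro cr t
    simp only [List.foldl_cons, List.length_cons]
    rw [List.range_succ_eq_map, List.countP_cons, List.countP_map]
    by_cases hb : b = true
    · subst hb
      simp only [if_true]
      have hcast : ((cr : Int) + 1) = (((cr + 1 : Nat)) : Int) := by push_cast; ring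
      rw [hcast, ih (cr + 1)]
      have hhead : (decide (kn ≤ cr + 0 + 1) && (List.range kn).all (fun j => decide (0 < j) || (true :: rest).getD (0 - j) false)) = decide (kn ≤ cr + 1) := by
        have hall : (List.range kn).all (fun j => decide (0 < j) || (true :: rest).getD (0 - j) false) = true := by
          simp only [List.all_eq_true, List.mem_range]
          intro j hj
          cases j with
          | zero => simp
          | succ m => simp
        simp only [hall, Bool.and_true, Nat.add_zero]
      have hshift : (List.range rest.length).countP ((fun i => decide (kn ≤ cr + i + 1) && (List.range kn).all fun j => decide (i < j) || (true :: rest).getD (i - j) false) ∘ Nat.succ)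
          = (List.range rest.length).countP (fun i => decide (kn ≤ (cr + 1) + i + 1) && (List.range kn).all fun j => decide (i < j) || rest.getD (i - j) false) := by
        apply List.countP_congr
        intro i _
        simp only [Function.comp_apply, Nat.succ_eq_add_one, Bool.and_eq_true, decide_eq_true_eq,
          List.all_eq_true, List.mem_range, Bool.or_eq_true]
        constructor
        · rintro ⟨hle, hall⟩
          refine ⟨by omega, fun j hj => ?_⟩
          rcases Nat.lt_or_ge i j with hij | hij
          · left; exact hij
          · rcases hall j hj with h' | h'
            · omega
            · right
              have hidx : i + 1 - j = (i - j) + 1 := by omega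
              rw [hidx, List.getD_cons_succ] at h'
              exact h'
        · rintro ⟨hle, hall⟩
          refine ⟨by omega, fun j hj => ?_⟩
          rcases Nat.lt_or_ge (i + 1) j with hij | hij
          · left; exact hij
          · right
            rcases Nat.eq_or_lt_of_le hij with he | hlt
            · have hidx : i + 1 - j = 0 := by omega
              rw [hidx]
              simp
            · have hidx : i + 1 - j = (i - j) + 1 := by omega
              rw [hidx, List.getD_cons_succ]
              rcases hall j hj with h' | h'
              · omega
              · exact h'
      rw [hshift, hhead]
      have hif : (if k ≤ ((cr + 1 : Nat) : Int) then t + 1 else t) = t + (if decide (kn ≤ cr + 1) = true then (1 : Int) else 0) := by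
        by_cases hcr : kn ≤ cr + 1
        · rw [if_pos (show k ≤ ((cr + 1 : Nat) : Int) by push_cast; omega), if_pos (by simpa using hcr)]
        · rw [if_neg (show ¬ k ≤ ((cr + 1 : Nat) : Int) by push_cast; omega), if_neg (by simpa using hcr), add_zero]
      rw [hif]
      push_cast
      ring
    · have hb' : b = false := by simpa using hb
      subst hb'
      simp only [Bool.false_eq_true, if_false]
      have h00 := ih 0 t
      simp only [Nat.cast_zero] at h00
      rw [h00]
      have hhead : (decide (kn ≤ cr + 0 + 1) && (List.range kn).all (fun j => decide (0 < j) || (false :: rest).getD (0 - j) false)) = false := by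
        have hall : (List.range kn).all (fun j => decide (0 < j) || (false :: rest).getD (0 - j) false) = false := by
          rw [List.all_eq_false]
          exact ⟨0, by simp [List.mem_range]; omega, by simp⟩
        simp only [hall, Bool.and_false]
      have hshift : (List.range rest.length).countP ((fun i => decide (kn ≤ cr + i + 1) && (List.range kn).all fun j => decide (i < j) || (false :: rest).getD (i - j) false) ∘ Nat.succ)
          = (List.range rest.length).countP (fun i => decide (kn ≤ 0 + i + 1) && (List.range kn).all fun j => decide (i < j) || rest.getD (i - j) false) := by
        apply List.countP_congr
        intro i _
        simp only [Function.comp_apply, Nat.succ_eq_add_one, Bool.and_eq_true, decide_eq_true_eq,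
          List.all_eq_true, List.mem_range, Bool.or_eq_true]
        constructor
        · rintro ⟨hle, hall⟩
          have hkle : kn ≤ i + 1 := by
            by_contra hgt
            rcases hall (i + 1) (by omega) with h' | h'
            · omega
            · have hidx : i + 1 - (i + 1) = 0 := by omega
              rw [hidx] at h'
              simp at h'
          refine ⟨by omega, fun j hj => ?_⟩
          have hji : j ≤ i := by omega
          rcases hall j hj with h' | h'
          · omega
          · right
            have hidx : i + 1 - j = (i - j) + 1 := by omega
            rw [hidx, List.getD_cons_succ] at h'
            exact h'
        · rintro ⟨hle, hall⟩
          refine ⟨by omega, fun j hj => ?_⟩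
          have hji : j ≤ i := by omega
          rcases hall j hj with h' | h'
          · omega
          · right
            have hidx : i + 1 - j = (i - j) + 1 := by omega
            rw [hidx, List.getD_cons_succ]
            exact h'
      rw [hshift, hhead]
      simp

-- List.countP over a range as a Finset card
theorem pv_countP_card (n : Nat) (p : Nat → Bool) :
    (List.range n).countP p = ((Finset.range n).filter (fun i => p i = true)).card := by
  induction n with
  | zero => simp
  | succ m ih =>
    rw [List.range_succ, List.countP_append, ih, Finset.range_add_one, Finset.filter_insert]
    by_cases hp : p m = true
    · rw [if_pos hp, Finset.card_insert_of_notMem (by simp)]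
      simp [hp]
    · rw [if_neg hp]
      simp [hp]

-- List.map-sum over a range as a Finset sum
theorem pv_sum_range (n : Nat) (f : Nat → Int) : ((List.range n).map f).sum = ∑ i ∈ Finset.range n, f i := by
  induction n with
  | zero => simp
  | succ m ih =>
    rw [List.range_succ, List.map_append, List.sum_append, Finset.sum_range_succ, ih]
    simp

-- List.countP over a range as a Finset 0/1-sum
theorem pv_countP_sum (n : Nat) (p : Nat → Bool) :
    ((List.range n).countP p : Int) = ∑ i ∈ Finset.range n, (if p i then (1 : Int) else 0) := by
  induction n with
  | zero => simp
  | succ m ih =>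
    rw [List.range_succ, List.countP_append, Finset.sum_range_succ, Nat.cast_add, ih]
    by_cases hp : p m = true
    · simp [hp]
    · simp [hp]

-- runs of length ≥ k ending at row i are exactly windows of k starting at row i+1-k
theorem pv_shift (board : List (List String)) (player : String) (kn : Nat) (hk : 1 ≤ kn) (n c : Nat) :
    (List.range n).countP (fun i => pvEnd board player kn c i)
    = (List.range (n + 1 - kn)).countP (fun r => pvWin board player kn r c) := by
  rw [pv_countP_card, pv_countP_card]
  apply Finset.card_nbij' (fun i => i + 1 - kn) (fun r => r + kn - 1)
  · intro i hi
    simp only [Finset.coe_filter, Set.mem_setOf_eq, Finset.mem_range, pvEnd, pvWin,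
      Bool.and_eq_true, decide_eq_true_eq, List.all_eq_true, List.mem_range, Bool.or_eq_true] at hi ⊢
    obtain ⟨hin, hle, hall⟩ := hi
    refine ⟨by omega, fun j hj => ?_⟩
    rcases hall (kn - 1 - j) (by omega) with h' | h'
    · omega
    · have hidx : i - (kn - 1 - j) = i + 1 - kn + j := by omega
      rw [hidx] at h'
      exact h'
  · intro r hr
    simp only [Finset.coe_filter, Set.mem_setOf_eq, Finset.mem_range, pvEnd, pvWin,
      Bool.and_eq_true, decide_eq_true_eq, List.all_eq_true, List.mem_range, Bool.or_eq_true] at hr ⊢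
    obtain ⟨hrn, hall⟩ := hr
    refine ⟨by omega, by omega, fun j hj => ?_⟩
    right
    have hidx : r + kn - 1 - j = r + (kn - 1 - j) := by omega
    rw [hidx]
    exact hall (kn - 1 - j) (by omega)
  · intro i hi
    simp only [Finset.coe_filter, Set.mem_setOf_eq, Finset.mem_range, pvEnd,
      Bool.and_eq_true, decide_eq_true_eq] at hi
    obtain ⟨hin, hle, -⟩ := hi
    show i + 1 - kn + kn - 1 = i
    omega
  · intro r hr
    simp only [Finset.coe_filter, Set.mem_setOf_eq, Finset.mem_range] at hr
    show r + kn - 1 + 1 - kn = r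
    omega

-- exchanging the two summations
theorem pv_swap (m C : Nat) (q : Nat → Nat → Bool) :
    ((List.range m).map (fun r => (((List.range C).countP (fun c => q r c)) : Int))).sum
    = ((List.range C).map (fun c => (((List.range m).countP (fun r => q r c)) : Int))).sum := by
  rw [pv_sum_range, pv_sum_range]
  calc ∑ r ∈ Finset.range m, (((List.range C).countP (fun c => q r c)) : Int)
      = ∑ r ∈ Finset.range m, ∑ c ∈ Finset.range C, (if q r c then (1 : Int) else 0) := by
        refine Finset.sum_congr rfl (fun r _ => ?_)
        rw [pv_countP_sum]
    _ = ∑ c ∈ Finset.range C, ∑ r ∈ Finset.range m, (if q r c then (1 : Int) else 0) := Finset.sum_comm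
    _ = ∑ c ∈ Finset.range C, (((List.range m).countP (fun r => q r c)) : Int) := by
        refine Finset.sum_congr rfl (fun c _ => ?_)
        rw [pv_countP_sum]

-- A's per-cell test equals the window predicate
theorem pv_winA_eq (board : List (List String)) (player : String) (k : Int) (hk : 1 ≤ k) (r c : Nat) :
    ((PySem.List.pyGetD (PySem.List.pyGetD board (r : Int) []) (c : Int) "" == player)
      && (PySem.List.pyRange 0 k 1).all (fun kadd =>
           PySem.List.pyGetD (PySem.List.pyGetD board (r : Int) []) (c : Int) ""
             == PySem.List.pyGetD (PySem.List.pyGetD board ((r : Int) + kadd) []) (c : Int) ""))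
    = pvWin board player k.toNat r c := by
  have hcell : ∀ m : Nat, PySem.List.pyGetD (PySem.List.pyGetD board (m : Int) []) (c : Int) "" = (board.getD m []).getD c "" := by
    intro m
    rw [PySem.List.pyGetD_natCast, PySem.List.pyGetD_natCast]
  have hcell2 : ∀ j : Nat, PySem.List.pyGetD (PySem.List.pyGetD board ((r : Int) + (0 + (j : Int))) []) (c : Int) "" = (board.getD (r + j) []).getD c "" := by
    intro j
    have : (r : Int) + (0 + (j : Int)) = ((r + j : Nat) : Int) := by push_cast; ring
    rw [this, hcell]
  rw [PySem.List.pyRange_one, List.all_map, Bool.eq_iff_iff]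
  simp only [Bool.and_eq_true, List.all_eq_true, List.mem_range, Function.comp_apply,
    beq_iff_eq, pvWin, pvCellB, Int.sub_zero, hcell, hcell2]
  constructor
  · rintro ⟨hp, hall⟩ j hj
    rw [← hall j hj, hp]
  · intro hall
    have h0 : (board.getD (r + 0) []).getD c "" = player := hall 0 (by omega)
    rw [Nat.add_zero] at h0
    refine ⟨h0, fun j hj => ?_⟩
    rw [h0, hall j hj]

-- B's per-cell test, read back through the column flag list
theorem pv_endB_eq (board : List (List String)) (player : String) (kn cn i : Nat) (hi : i < board.length) :
    (decide (kn ≤ 0 + i + 1) && (List.range kn).all (fun j => decide (i < j) || (board.map (fun row => PySem.List.pyGetD row (cn : Int) "" == player)).getD (i - j) false))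
    = pvEnd board player kn cn i := by
  have hterm : ∀ j : Nat, (board.map (fun row => PySem.List.pyGetD row (cn : Int) "" == player)).getD (i - j) false = pvCellB board player (i - j) cn := by
    intro j
    have h1 : i - j < (board.map (fun row => PySem.List.pyGetD row (cn : Int) "" == player)).length := by
      simp only [List.length_map]; omega
    rw [List.getD_eq_getElem _ _ h1, List.getElem_map, PySem.List.pyGetD_natCast]
    unfold pvCellB
    rw [List.getD_eq_getElem _ _ (by omega : i - j < board.length)]
  have hfun : (fun j => decide (i < j) || (board.map (fun row => PySem.List.pyGetD row (cn : Int) "" == player)).getD (i - j) false)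
      = (fun j => decide (i < j) || pvCellB board player (i - j) cn) := by
    funext j
    rw [hterm j]
  rw [hfun]
  unfold pvEnd
  simp only [Nat.zero_add]

-- A as a row-major double sum of window indicators
theorem pv_A_sum (board : List (List String)) (player : String) (k : Int) (hk : 1 ≤ k) :
    vertical_check_k board player k
    = ((List.range (board.length + 1 - k.toNat)).map (fun r =>
        (((List.range ((board.getD 0 []).length)).countP (fun c => pvWin board player k.toNat r c)) : Int))).sum := by
  unfold vertical_check_k
  have hstep : ∀ (st : Int × Int) (row : Int),
      ((PySem.List.pyRange 0 ((PySem.List.pyGetD board 0 []).length : Int) 1).foldl (fun st column =>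
        if PySem.List.pyGetD (PySem.List.pyGetD board row []) column "" == player then
          (PySem.List.pyRange 0 k 1).foldl (fun st kadd =>
            if PySem.List.pyGetD (PySem.List.pyGetD board row []) column ""
               == PySem.List.pyGetD (PySem.List.pyGetD board (row + kadd) []) column "" then
              ((st.1 + 1 : Int), if st.1 + 1 == k then st.2 + 1 else st.2)
            else st) ((0 : Int), st.2)
        else st) st).2
      = st.2 + ((PySem.List.pyRange 0 ((PySem.List.pyGetD board 0 []).length : Int) 1).map (fun column =>
          if (PySem.List.pyGetD (PySem.List.pyGetD board row []) column "" == player)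
             && (PySem.List.pyRange 0 k 1).all (fun kadd =>
                  PySem.List.pyGetD (PySem.List.pyGetD board row []) column ""
                    == PySem.List.pyGetD (PySem.List.pyGetD board (row + kadd) []) column "")
          then (1 : Int) else 0)).sum := by
    intro st row
    apply pv_foldl_snd
    intro st' col
    by_cases hp : (PySem.List.pyGetD (PySem.List.pyGetD board row []) col "" == player) = true
    · simp only [hp, if_true, Bool.true_and]
      rw [pv_foldk_spec k hk]
    · have hp' : (PySem.List.pyGetD (PySem.List.pyGetD board row []) col "" == player) = false := by
        simpa using hp
      simp [hp']
  rw [pv_foldl_snd _ _ hstep]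
  rw [zero_add]
  rw [PySem.List.pyRange_one 0 ((board.length : Int) - (k - 1)), List.map_map]
  have hm : (((board.length : Int) - (k - 1)) - 0).toNat = board.length + 1 - k.toNat := by omega
  rw [hm]
  refine congrArg List.sum (List.map_congr_left (fun r _ => ?_))
  simp only [Function.comp_apply, zero_add]
  rw [PySem.List.pyRange_one 0 ((PySem.List.pyGetD board 0 []).length : Int), List.map_map]
  have hC : (((PySem.List.pyGetD board 0 []).length : Int) - 0).toNat = (board.getD 0 []).length := by
    rw [PySem.List.pyGetD_zero]
    omega
  rw [hC, pv_countP_sum, pv_sum_range]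
  refine Finset.sum_congr rfl (fun c _ => ?_)
  simp only [Function.comp_apply, zero_add]
  rw [pv_winA_eq board player k hk r c]

-- B as a column-major double sum of run-end indicators
set_option maxHeartbeats 1000000 in
theorem pv_B_sum (board : List (List String)) (player : String) (k : Int) (hk : 1 ≤ k) :
    vertical_check_k_alt board player k
    = ((List.range ((board.getD 0 []).length)).map (fun c =>
        (((List.range board.length).countP (fun i => pvEnd board player k.toNat c i)) : Int))).sum := by
  show (PySem.List.pyRange 0 (if board.isEmpty then 0 else ((PySem.List.pyGetD board 0 []).length : Int)) 1).foldl (fun total c =>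
      (board.foldl (fun st row =>
        if PySem.List.pyGetD row c "" == player then
          ((st.1 + 1 : Int), if k ≤ st.1 + 1 then st.2 + 1 else st.2)
        else ((0 : Int), st.2)) ((0 : Int), total)).2) 0 = _
  have hcols : (if board.isEmpty then (0 : Int) else ((PySem.List.pyGetD board 0 []).length : Int)) = ((board.getD 0 []).length : Int) := by
    cases board with
    | nil => simp
    | cons h t => simp [PySem.List.pyGetD_zero]
  simp only [hcols]
  have hmem : ∀ (acc : Int), ∀ c ∈ PySem.List.pyRange 0 ((board.getD 0 []).length : Int) 1,
      (board.foldl (fun st row =>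
        if PySem.List.pyGetD row c "" == player then
          ((st.1 + 1 : Int), if k ≤ st.1 + 1 then st.2 + 1 else st.2)
        else ((0 : Int), st.2)) ((0 : Int), acc)).2
      = acc + (((List.range board.length).countP (fun i => pvEnd board player k.toNat c.toNat i)) : Int) := by
    intro acc c hc
    obtain ⟨hc0, hcC⟩ := PySem.List.mem_pyRange_one.mp hc
    obtain ⟨cn, rfl⟩ : ∃ n : Nat, c = (n : Int) := ⟨c.toNat, (Int.toNat_of_nonneg hc0).symm⟩
    rw [← List.foldl_map (f := fun row => PySem.List.pyGetD row ((cn : Nat) : Int) "" == player)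
          (g := fun st b => if b then ((st.1 + 1 : Int), if k ≤ st.1 + 1 then st.2 + 1 else st.2) else ((0 : Int), st.2))]
    have h00 := pv_runB k k.toNat (Int.toNat_of_nonneg (by omega)) (by omega)
      (board.map (fun row => PySem.List.pyGetD row ((cn : Nat) : Int) "" == player)) 0 acc
    simp only [Nat.cast_zero] at h00
    rw [h00]
    simp only [List.length_map, Int.toNat_natCast]
    congr 2
    apply List.countP_congr
    intro i hi
    rw [pv_endB_eq board player k.toNat cn i (List.mem_range.mp hi)]
  rw [PySem.List.foldl_congr_mem _ _
      (fun acc c => acc + (((List.range board.length).countP (fun i => pvEnd board player k.toNat c.toNat i)) : Int)) 0 hmem]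
  rw [PySem.List.foldl_add, zero_add]
  rw [PySem.List.pyRange_one 0 ((board.getD 0 []).length : Int), List.map_map]
  have hC : ((((board.getD 0 []).length : Int)) - 0).toNat = (board.getD 0 []).length := by omega
  rw [hC]
  refine congrArg List.sum (List.map_congr_left (fun c _ => ?_))
  simp only [Function.comp_apply, zero_add, Int.toNat_natCast]

-- ===== VERDICT (by name: the statement is the Claim_ definition above) =====
theorem vertical_check_k_spec : Claim_equal_vertical_check_k := by
  unfold Claim_equal_vertical_check_k
  intro board player k _hdom hpre
  unfold Spec_vertical_check_k
  obtain ⟨hrect, hk⟩ := hpre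
  rcases hk with hk | ⟨hne, hC⟩
  · have hkn1 : 1 ≤ k.toNat := by omega
    rw [pv_A_sum board player k hk, pv_B_sum board player k hk]
    have hmapeq : (List.range ((board.getD 0 []).length)).map (fun c =>
          (((List.range board.length).countP (fun i => pvEnd board player k.toNat c i)) : Int))
        = (List.range ((board.getD 0 []).length)).map (fun c =>
          (((List.range (board.length + 1 - k.toNat)).countP (fun r => pvWin board player k.toNat r c)) : Int)) :=
      List.map_congr_left (fun c _ => by rw [pv_shift board player k.toNat hkn1 board.length c])
    rw [hmapeq]
    exact pv_swap (board.length + 1 - k.toNat) ((board.getD 0 []).length)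
      (fun r c => pvWin board player k.toNat r c)
  · have hC0 : board[0]?.getD [] = [] := by
      cases board with
      | nil => simp at hne
      | cons h t => simpa using hC
    unfold vertical_check_k vertical_check_k_alt
    simp [PySem.List.pyGetD_zero, hC0, PySem.List.pyRange_one]
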